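-- pv_equiv track=rewrite | github.com/merlijntishauser/unifi-homelab-ops | backend/app/services/_rule_coverage.py | port_ranges_overlap
-- ===== SOURCE A (Python) =====
-- def _parse_port_constraint(port_range: str) -> tuple[int, int] | None:
--     """Parse a port constraint string into a (low, high) tuple, or None if invalid."""
--     normalized = port_range.strip()
--     if not normalized:
--         return None
--     if "-" not in normalized:
--         try:
--             port = int(normalized)
--         except ValueError:
--             return None
--         return (port, port)
--     low_raw, high_raw = normalized.split("-", 1)
--     try:
--         low = int(low_raw)
--         high = int(high_raw)
--     except ValueError:
--         return None
--     if low > high: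
--         return None
--     return (low, high)
--
-- def port_ranges_overlap(earlier_ports: list[str], later_ports: list[str]) -> bool:
--     """Check if two sets of port constraints have any overlap."""
--     if not earlier_ports or not later_ports:
--         return True  # No port constraint = matches all
--     earlier_parsed = [_parse_port_constraint(p) for p in earlier_ports]
--     later_parsed = [_parse_port_constraint(p) for p in later_ports]
--     earlier_ranges = [r for r in earlier_parsed if r is not None]
--     later_ranges = [r for r in later_parsed if r is not None]
--     if not earlier_ranges or not later_ranges:
--         return False
--     return any(
--         e_lo <= l_hi and l_lo <= e_hi
--         for e_lo, e_hi in earlier_ranges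
--         for l_lo, l_hi in later_ranges
--     )
-- ===== SOURCE B (Python) =====
-- def _parse_port_constraint(port_range: str):
--     """Parse a port constraint string into a (low, high) tuple, or None if invalid."""
--     normalized = port_range.strip()
--     if not normalized:
--         return None
--     if "-" not in normalized:
--         try:
--             port = int(normalized)
--         except ValueError:
--             return None
--         return (port, port)
--     low_raw, high_raw = normalized.split("-", 1)
--     try:
--         low = int(low_raw)
--         high = int(high_raw)
--     except ValueError:
--         return None
--     if low > high:
--         return None
--     return (low, high)
--
--
-- def port_ranges_overlap(earlier_ports: list, later_ports: list) -> bool: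
--     """Check if two sets of port constraints have any overlap (sort + two-pointer sweep)."""
--     if not earlier_ports or not later_ports:
--         return True  # No port constraint = matches all
--     earlier = sorted((r for r in map(_parse_port_constraint, earlier_ports) if r is not None),
--                      key=lambda r: r[0])
--     later = sorted((r for r in map(_parse_port_constraint, later_ports) if r is not None),
--                    key=lambda r: r[0])
--     if not earlier or not later:
--         return False
--     i = j = 0
--     while i < len(earlier) and j < len(later):
--         (e_lo, e_hi), (l_lo, l_hi) = earlier[i], later[j]
--         if e_lo <= l_hi and l_lo <= e_hi:
--             return True
--         # drop the interval that ends first: it can overlap nothing remaining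
--         if e_hi < l_hi:
--             i += 1
--         else:
--             j += 1
--     return False
-- ===== Notes on version B (the rewrite author's own statement) =====
-- stated objective: alternative
-- what changed: A tests every (earlier, later) range pair with a nested any; B sorts both parsed range lists by low bound and detects any overlap with a single two-pointer sweep.
import Mathlib
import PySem

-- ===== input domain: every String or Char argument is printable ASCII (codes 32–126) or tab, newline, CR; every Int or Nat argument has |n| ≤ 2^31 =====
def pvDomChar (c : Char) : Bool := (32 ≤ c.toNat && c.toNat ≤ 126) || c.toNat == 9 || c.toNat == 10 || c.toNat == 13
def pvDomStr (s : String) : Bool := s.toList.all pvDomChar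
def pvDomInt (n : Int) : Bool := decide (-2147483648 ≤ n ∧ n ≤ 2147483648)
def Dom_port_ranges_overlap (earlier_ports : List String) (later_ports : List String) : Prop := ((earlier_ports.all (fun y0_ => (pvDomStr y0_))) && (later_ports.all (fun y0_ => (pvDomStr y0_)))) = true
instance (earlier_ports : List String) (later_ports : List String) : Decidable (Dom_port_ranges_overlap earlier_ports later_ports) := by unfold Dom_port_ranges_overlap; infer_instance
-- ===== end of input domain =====

-- B replaces A's all-pairs overlap scan by sorting both parsed range lists by low bound
-- and running a two-pointer sweep (objective: alternative algorithm, same result).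

-- ===== PORT A =====
-- shared module helper _parse_port_constraint, transliterated
def parsePortConstraint (port_range : String) : Option (Int × Int) :=
  let normalized := PySem.Str.strip port_range
  if normalized = "" then none
  else if (PySem.Str.isIn "-" normalized) = false then
    match PySem.Int.ofStr? normalized with
    | none => none
    | some port => some (port, port)
  else
    match PySem.Str.splitMax? normalized "-" 1 with
    | some (low_raw :: high_raw :: _) =>
      match PySem.Int.ofStr? low_raw, PySem.Int.ofStr? high_raw with
      | some low, some high => if low > high then none else some (low, high)
      | _, _ => none
    | _ => none  -- unreachable totality guard: "-" in normalized gives two parts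

def port_ranges_overlap (earlier_ports : List String) (later_ports : List String) : Bool :=
  if earlier_ports = [] ∨ later_ports = [] then true
  else
    let earlier_parsed := earlier_ports.map parsePortConstraint
    let later_parsed := later_ports.map parsePortConstraint
    let earlier_ranges := earlier_parsed.filterMap id
    let later_ranges := later_parsed.filterMap id
    if earlier_ranges = [] ∨ later_ranges = [] then false
    else earlier_ranges.any (fun e => later_ranges.any (fun l => decide (e.1 ≤ l.2 ∧ l.1 ≤ e.2)))

-- ===== PORT B =====
-- the two-pointer while loop of Source B
def sweepOverlap : List (Int × Int) → List (Int × Int) → Bool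
  | [], _ => false
  | _ :: _, [] => false
  | e :: es, l :: ls =>
    if e.1 ≤ l.2 ∧ l.1 ≤ e.2 then true
    else if e.2 < l.2 then sweepOverlap es (l :: ls)
    else sweepOverlap (e :: es) ls
  termination_by es ls => es.length + ls.length

def port_ranges_overlap_alt (earlier_ports : List String) (later_ports : List String) : Bool :=
  if earlier_ports = [] ∨ later_ports = [] then true
  else
    let earlier := PySem.List.sorted ((earlier_ports.map parsePortConstraint).filterMap id) (fun r => r.1) false
    let later := PySem.List.sorted ((later_ports.map parsePortConstraint).filterMap id) (fun r => r.1) false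
    if earlier = [] ∨ later = [] then false
    else sweepOverlap earlier later

-- ===== PRECONDITION & SPEC =====
def Spec_port_ranges_overlap (earlier_ports : List String) (later_ports : List String) (out : Bool) : Prop := out = port_ranges_overlap_alt earlier_ports later_ports
instance (earlier_ports : List String) (later_ports : List String) (out : Bool) : Decidable (Spec_port_ranges_overlap earlier_ports later_ports out) := by unfold Spec_port_ranges_overlap; infer_instance

-- ===== CLAIM (what is proved, stated in full; the proofs are below) =====
def Claim_equal_port_ranges_overlap : Prop := ∀ (earlier_ports : List String) (later_ports : List String), Dom_port_ranges_overlap earlier_ports later_ports → Spec_port_ranges_overlap earlier_ports later_ports (port_ranges_overlap earlier_ports later_ports)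

-- ===== LEMMAS AND PROOFS =====

-- every range the parser accepts is well-formed: low ≤ high
theorem parse_lo_le_hi (s : String) (r : Int × Int)
    (h : parsePortConstraint s = some r) : r.1 ≤ r.2 := by
  simp only [parsePortConstraint] at h
  repeat' split at h
  all_goals
    first
    | (simp only [Option.some.injEq] at h; subst h; dsimp only; omega)
    | exact absurd h (by simp)

-- the sweep over lists sorted by low bound decides the existence of an overlapping pair
theorem sweepOverlap_iff (es ls : List (Int × Int)) :
    es.Pairwise (fun a b => a.1 ≤ b.1) → ls.Pairwise (fun a b => a.1 ≤ b.1) →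
    (∀ e ∈ es, e.1 ≤ e.2) → (∀ l ∈ ls, l.1 ≤ l.2) →
    (sweepOverlap es ls = true ↔ ∃ e ∈ es, ∃ l ∈ ls, e.1 ≤ l.2 ∧ l.1 ≤ e.2) := by
  induction es, ls using sweepOverlap.induct with
  | case1 ls => intro _ _ _ _; simp [sweepOverlap]
  | case2 e es => intro _ _ _ _; simp [sweepOverlap]
  | case3 e es l ls hov =>
    intro _ _ _ _
    simp only [sweepOverlap, if_pos hov]
    exact iff_of_true trivial ⟨e, List.mem_cons_self, l, List.mem_cons_self, hov⟩
  | case4 e es l ls hov hlt ih =>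
    intro hE hL hEwf hLwf
    simp only [sweepOverlap, if_neg hov, if_pos hlt]
    rw [ih hE.of_cons hL (fun x hx => hEwf x (List.mem_cons_of_mem _ hx)) hLwf]
    constructor
    · rintro ⟨e', he', l', hl', h⟩; exact ⟨e', List.mem_cons_of_mem _ he', l', hl', h⟩
    · rintro ⟨e', he', l', hl', h⟩
      rcases List.mem_cons.mp he' with rfl | he'
      · -- the head e' overlaps nothing on the right: e'.2 < l.1 ≤ l'.1
        have he12 : e'.1 ≤ e'.2 := hEwf e' List.mem_cons_self
        have h2 : e'.2 < l.1 := by by_contra hc; exact hov ⟨by omega, by omega⟩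
        have h3 : l.1 ≤ l'.1 := by
          rcases List.mem_cons.mp hl' with rfl | hl'
          · exact le_refl _
          · exact (List.pairwise_cons.mp hL).1 l' hl'
        obtain ⟨ha, hb⟩ := h
        exact absurd hb (by omega)
      · exact ⟨e', he', l', hl', h⟩
  | case5 e es l ls hov hlt ih =>
    intro hE hL hEwf hLwf
    simp only [sweepOverlap, if_neg hov, if_neg hlt]
    rw [ih hE hL.of_cons hEwf (fun x hx => hLwf x (List.mem_cons_of_mem _ hx))]
    constructor
    · rintro ⟨e', he', l', hl', h⟩; exact ⟨e', he', l', List.mem_cons_of_mem _ hl', h⟩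
    · rintro ⟨e', he', l', hl', h⟩
      rcases List.mem_cons.mp hl' with rfl | hl'
      · -- the head l' overlaps nothing on the left: l'.2 < e.1 ≤ e'.1
        have hl12 : l'.1 ≤ l'.2 := hLwf l' List.mem_cons_self
        have h2 : l'.2 < e.1 := by by_contra hc; exact hov ⟨by omega, by omega⟩
        have h3 : e.1 ≤ e'.1 := by
          rcases List.mem_cons.mp he' with rfl | he'
          · exact le_refl _
          · exact (List.pairwise_cons.mp hE).1 e' he'
        obtain ⟨ha, hb⟩ := h
        exact absurd ha (by omega)
      · exact ⟨e', he', l', hl', h⟩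

-- ===== VERDICT (by name: the statement is the Claim_ definition above) =====
theorem port_ranges_overlap_spec : Claim_equal_port_ranges_overlap := by
  intro earlier_ports later_ports _
  unfold Spec_port_ranges_overlap port_ranges_overlap port_ranges_overlap_alt
  by_cases h0 : earlier_ports = [] ∨ later_ports = []
  · simp [h0]
  · simp only [if_neg h0]
    set ER := (earlier_ports.map parsePortConstraint).filterMap id with hER
    set LR := (later_ports.map parsePortConstraint).filterMap id with hLR
    have hwfE : ∀ e ∈ ER, e.1 ≤ e.2 := by
      intro e he
      rcases List.mem_filterMap.mp he with ⟨o, ho, hoe⟩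
      rcases List.mem_map.mp ho with ⟨s, _, rfl⟩
      exact parse_lo_le_hi s e hoe
    have hwfL : ∀ l ∈ LR, l.1 ≤ l.2 := by
      intro l hl
      rcases List.mem_filterMap.mp hl with ⟨o, ho, hol⟩
      rcases List.mem_map.mp ho with ⟨s, _, rfl⟩
      exact parse_lo_le_hi s l hol
    have hnilE : (PySem.List.sorted ER (fun r => r.1) false = []) ↔ ER = [] :=
      PySem.List.sorted_eq_nil_iff ..
    have hnilL : (PySem.List.sorted LR (fun r => r.1) false = []) ↔ LR = [] :=
      PySem.List.sorted_eq_nil_iff ..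
    by_cases h1 : ER = [] ∨ LR = []
    · simp [h1, hnilE, hnilL]
    · rw [if_neg h1, if_neg (by rw [hnilE, hnilL]; exact h1)]
      rw [Bool.eq_iff_iff]
      rw [sweepOverlap_iff _ _ (PySem.List.sorted_pairwise ..) (PySem.List.sorted_pairwise ..)
        (fun e he => hwfE e ((PySem.List.mem_sorted ..).mp he))
        (fun l hl => hwfL l ((PySem.List.mem_sorted ..).mp hl))]
      simp only [List.any_eq_true, decide_eq_true_eq, PySem.List.mem_sorted]
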